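-- pv_equiv track=rewrite | github.com/Osmait/challenges | Python/matriz.py | solution
-- ===== SOURCE A (Python) =====
-- def solution(matrix):
--     total = 0
--
--     for j in range(0, len(matrix[0])):
--         for i in range(0, len(matrix)):
--             if (matrix[i][j] == 0):
--                 break
--             else:
--                 total += matrix[i][j]
--
--     return total
-- ===== SOURCE B (Python) =====
-- def solution(matrix):
--     ncols = len(matrix[0])
--     active = [True] * ncols
--     total = 0
--     for row in matrix:
--         for j in range(ncols):
--             if active[j]:
--                 v = row[j]
--                 if v == 0:
--                     active[j] = False
--                 else:
--                     total += v
--     return total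
-- ===== Notes on version B (the rewrite author's own statement) =====
-- stated objective: alternative
-- what changed: B traverses the matrix row by row in a single row-major pass, maintaining a per-column 'active' boolean list that is switched off at a column's first zero, instead of A's column-by-column rescans of the whole matrix.
import Mathlib
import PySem

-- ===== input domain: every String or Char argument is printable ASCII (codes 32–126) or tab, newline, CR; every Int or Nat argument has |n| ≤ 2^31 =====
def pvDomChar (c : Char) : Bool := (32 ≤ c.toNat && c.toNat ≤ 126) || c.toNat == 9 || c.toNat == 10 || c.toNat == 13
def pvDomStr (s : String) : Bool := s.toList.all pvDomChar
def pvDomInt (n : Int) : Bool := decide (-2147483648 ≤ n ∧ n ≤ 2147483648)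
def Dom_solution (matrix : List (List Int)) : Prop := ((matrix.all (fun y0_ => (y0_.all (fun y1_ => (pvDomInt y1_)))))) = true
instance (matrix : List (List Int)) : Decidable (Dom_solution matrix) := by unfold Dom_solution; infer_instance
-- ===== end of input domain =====

-- B replaces A's column-by-column rescans by one row-major pass with a per-column 'active' flag list (alternative decomposition, same cost).


-- ===== PORT A =====
-- inner loop 'for i in range(0, len(matrix)): … break …' ported as structural recursion over
-- the row list (matrix[i] for i = 0,1,… in order is exactly the structural traversal);
-- matrix[i][j] → pyGet? (getD 0 is never reached inside Pre_solution)
def aInner (rows : List (List Int)) (j : Int) (total : Int) : Int :=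
  match rows with
  | [] => total
  | r :: rs =>
    let v := (PySem.List.pyGet? r j).getD 0
    if v = 0 then total else aInner rs j (total + v)

def solution (matrix : List (List Int)) : Int :=
  let ncols : Int := (((PySem.List.pyGet? matrix 0).getD []).length : Int)
  (PySem.List.pyRange 0 ncols 1).foldl (fun total j => aInner matrix j total) 0

-- ===== PORT B =====
-- inner loop 'for j in range(ncols): if active[j]: …' ported as structural recursion over the
-- active list, carrying the index j for row[j] (row[j] → pyGet?, default never reached inside Pre_)
def bInner (active : List Bool) (row : List Int) (j : Int) (total : Int) : List Bool × Int :=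
  match active with
  | [] => ([], total)
  | a :: rest =>
    if a then
      let v := (PySem.List.pyGet? row j).getD 0
      if v = 0 then
        let p := bInner rest row (j + 1) total
        (false :: p.1, p.2)
      else
        let p := bInner rest row (j + 1) (total + v)
        (true :: p.1, p.2)
    else
      let p := bInner rest row (j + 1) total
      (a :: p.1, p.2)

def bOuter (rows : List (List Int)) (active : List Bool) (total : Int) : Int :=
  match rows with
  | [] => total
  | r :: rs =>
    let p := bInner active r 0 total
    bOuter rs p.1 p.2

def solution_alt (matrix : List (List Int)) : Int :=
  let ncols := ((PySem.List.pyGet? matrix 0).getD []).length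
  bOuter matrix (List.replicate ncols true) 0

-- ===== PRECONDITION & SPEC =====
-- Pre_ excludes exactly the inputs on which A raises IndexError: the empty matrix (matrix[0]),
-- and matrices where some element access matrix[i][j] that A actually reaches (j < len(matrix[0]),
-- every entry above it in column j present and nonzero) is out of the row's range.
def Pre_solution (matrix : List (List Int)) : Prop :=
  matrix ≠ [] ∧
    ∀ j ∈ List.range (matrix.headI).length, ∀ i ∈ List.range matrix.length,
      (∀ i' ∈ List.range i,
          j < (matrix.getD i' []).length ∧ (matrix.getD i' []).getD j 0 ≠ 0) →
        j < (matrix.getD i []).length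
instance (matrix : List (List Int)) : Decidable (Pre_solution matrix) := by
  unfold Pre_solution; infer_instance

def pvWitness_solution : List (List Int) := [[1, 2], [0, 3], [4, 5]]

def Spec_solution (matrix : List (List Int)) (out : Int) : Prop := out = solution_alt matrix
instance (matrix : List (List Int)) (out : Int) : Decidable (Spec_solution matrix out) := by
  unfold Spec_solution; infer_instance

-- ===== CLAIM (what is proved, stated in full; the proofs are below) =====
def Claim_equal_solution : Prop := ∀ (matrix : List (List Int)), Dom_solution matrix → Pre_solution matrix → Spec_solution matrix (solution matrix)

-- ===== LEMMAS AND PROOFS =====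

-- value at row/column, as both ports read it
def vAt (row : List Int) (j : Int) : Int := (PySem.List.pyGet? row j).getD 0

-- sum of column j down to (excluding) its first zero — A's inner loop computes total + this
def colSum (rows : List (List Int)) (j : Int) : Int :=
  match rows with
  | [] => 0
  | r :: rs => if vAt r j = 0 then 0 else vAt r j + colSum rs j

lemma aInner_eq (rows : List (List Int)) (j : Int) :
    ∀ total, aInner rows j total = total + colSum rows j := by
  induction rows with
  | nil => intro t; simp [aInner, colSum]
  | cons r rs ih =>
    intro t
    simp only [aInner, colSum, vAt]
    split_ifs with h
    · omega
    · rw [ih]; ring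

-- active list after B processes one row
def actUpd (active : List Bool) (row : List Int) (j : Int) : List Bool :=
  match active with
  | [] => []
  | a :: rest => (a && !(vAt row j = 0 : Bool)) :: actUpd rest row (j + 1)

-- total added by B while processing one row
def rowC (active : List Bool) (row : List Int) (j : Int) : Int :=
  match active with
  | [] => 0
  | a :: rest => (if a = true ∧ vAt row j ≠ 0 then vAt row j else 0) + rowC rest row (j + 1)

lemma bInner_eq (active : List Bool) (row : List Int) :
    ∀ j total, bInner active row j total = (actUpd active row j, total + rowC active row j) := by
  induction active with
  | nil => intro j t; simp [bInner, actUpd, rowC]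
  | cons a rest ih =>
    intro j t
    simp only [bInner, actUpd, rowC, vAt]
    by_cases ha : a
    · subst ha
      by_cases hv : (PySem.List.pyGet? row j).getD 0 = 0 <;>
        simp [hv, ih]; ring_nf
    · simp at ha; subst ha
      simp [ih]

-- B's remaining contribution from a given active list: the still-active column sums
def contrib (active : List Bool) (rows : List (List Int)) (j : Int) : Int :=
  match active with
  | [] => 0
  | a :: rest => (if a = true then colSum rows j else 0) + contrib rest rows (j + 1)

lemma contrib_nil (active : List Bool) : ∀ j, contrib active [] j = 0 := by
  induction active with
  | nil => intro j; simp [contrib]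
  | cons a rest ih => intro j; simp [contrib, colSum, ih]

lemma contrib_cons (active : List Bool) (r : List Int) (rs : List (List Int)) :
    ∀ j, contrib active (r :: rs) j = rowC active r j + contrib (actUpd active r j) rs j := by
  induction active with
  | nil => intro j; simp [contrib, rowC, actUpd]
  | cons a rest ih =>
    intro j
    simp only [contrib, rowC, actUpd, colSum, ih]
    by_cases ha : a
    · subst ha
      by_cases hv : vAt r j = 0
      · simp [hv]
      · simp [hv]
        ring
    · simp at ha; subst ha; simp

lemma bOuter_eq (rows : List (List Int)) :
    ∀ active total, bOuter rows active total = total + contrib active rows 0 := by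
  induction rows with
  | nil => intro active t; simp [bOuter, contrib_nil]
  | cons r rs ih =>
    intro active t
    simp only [bOuter, bInner_eq, ih, contrib_cons]
    ring

-- A's fold over range(0, n) equals the all-active contribution
lemma aFold_eq (rows : List (List Int)) :
    ∀ (n : Nat) (j t : Int),
      (PySem.List.pyRange j (j + n) 1).foldl (fun total k => aInner rows k total) t
        = t + contrib (List.replicate n true) rows j := by
  intro n
  induction n with
  | zero => intro j t; simp [PySem.List.pyRange_one_eq_nil, contrib]
  | succ m ih =>
    intro j t
    rw [PySem.List.pyRange_one_cons (by omega : j < j + (m + 1 : Nat))]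
    simp only [List.foldl_cons]
    have : j + ((m : Int) + 1) = (j + 1) + m := by ring
    push_cast
    rw [this, ih (j + 1)]
    simp only [List.replicate, contrib, aInner_eq, if_true]
    ring

lemma main_eq (matrix : List (List Int)) : solution matrix = solution_alt matrix := by
  unfold solution solution_alt
  have h := aFold_eq matrix (((PySem.List.pyGet? matrix 0).getD []).length) 0 0
  simpa using h.trans (by rw [bOuter_eq])

-- ===== VERDICT (by name: the statement is the Claim_ definition above) =====
theorem solution_spec : Claim_equal_solution := by
  intro matrix _ _
  unfold Spec_solution
  exact main_eq matrix
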